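-- pv_equiv track=rewrite | github.com/Neterukun1993/Library | TestCase/unittest/gcd_convolve.unittest.test.py | naive_gcd_convolve
-- ===== SOURCE A (Python) =====
-- def naive_gcd_convolve(a, b):
--     """O(N^2) naive calculation"""
--     def gcd(x, y):
--         while y:
--             x, y = y, x % y
--         return x
--
--     n = min(len(a), len(b))
--     res = [0] * n
--     for i, va in enumerate(a[1:], 1):
--         for j, vb in enumerate(b[1:], 1):
--             res[gcd(i, j)] += va * vb
--     return res
-- ===== SOURCE B (Python) =====
-- def naive_gcd_convolve(a, b):
--     """GCD convolution via divisor (Dirichlet) sums and Mobius-style inclusion-exclusion."""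
--     n = min(len(a), len(b))
--     res = [0] * n
--     for d in range(1, n):
--         sa = sum(a[i] for i in range(d, len(a), d))
--         sb = sum(b[j] for j in range(d, len(b), d))
--         res[d] = sa * sb
--     for g in reversed(range(1, n)):
--         for m in range(2 * g, n, g):
--             res[g] -= res[m]
--     return res
-- ===== Notes on version B (the rewrite author's own statement) =====
-- stated objective: faster
-- what changed: A accumulates a[i]*b[j] into res[gcd(i,j)] over all O(N^2) index pairs with a per-pair Euclidean gcd; B instead computes divisor (Dirichlet) sums sum(a[multiples of d]) and sum(b[multiples of d]) for each d, multiplies them pointwise, and recovers the gcd-exact values by inclusion-exclusion over multiples from the largest index downward.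
import Mathlib
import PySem

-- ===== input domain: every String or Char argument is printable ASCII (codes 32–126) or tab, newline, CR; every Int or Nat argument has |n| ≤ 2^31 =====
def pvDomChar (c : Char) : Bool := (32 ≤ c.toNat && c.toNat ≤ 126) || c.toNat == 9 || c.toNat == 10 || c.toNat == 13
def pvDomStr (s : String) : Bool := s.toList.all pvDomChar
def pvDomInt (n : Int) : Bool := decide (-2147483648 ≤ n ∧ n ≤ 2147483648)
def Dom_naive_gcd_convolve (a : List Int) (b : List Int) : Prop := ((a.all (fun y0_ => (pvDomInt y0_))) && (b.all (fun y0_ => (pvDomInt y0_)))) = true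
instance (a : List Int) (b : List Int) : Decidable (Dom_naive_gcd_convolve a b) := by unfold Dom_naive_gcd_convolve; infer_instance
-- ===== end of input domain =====

-- B replaces A's O(N^2 log N) all-pairs gcd loop by divisor (Dirichlet) sums multiplied
-- pointwise followed by inclusion-exclusion over multiples (O(N log N)): objective = faster.

-- ===== PORT A =====
-- Python's inner helper `gcd` (while y: x, y = y, x % y), transliterated on Int with Python's `%`.
def pyGcdLoop (x y : Int) : Int :=
  if hy : y = 0 then x else pyGcdLoop y (PySem.Int.mod x y)
termination_by y.natAbs
decreasing_by
  rcases lt_trichotomy y 0 with h | h | h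
  · have h1 := PySem.Int.mod_neg_bounds x h
    omega
  · exact absurd h hy
  · have h1 := PySem.Int.mod_nonneg x h
    have h2 := PySem.Int.mod_lt x h
    omega

def naive_gcd_convolve (a : List Int) (b : List Int) : List Int :=
  let n := min a.length b.length
  let res := List.replicate n (0 : Int)
  (PySem.List.enumerate (PySem.List.slice a (some 1) none) 1).foldl
    (fun res iva =>
      (PySem.List.enumerate (PySem.List.slice b (some 1) none) 1).foldl
        (fun res jvb =>
          PySem.List.pySetD res (pyGcdLoop iva.1 jvb.1)
            (PySem.List.pyGetD res (pyGcdLoop iva.1 jvb.1) 0 + iva.2 * jvb.2))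
        res)
    res

-- ===== PORT B =====
def naive_gcd_convolve_alt (a : List Int) (b : List Int) : List Int :=
  let n := min a.length b.length
  let res := List.replicate n (0 : Int)
  let res :=
    (PySem.List.pyRange 1 (n : Int) 1).foldl
      (fun res d =>
        let sa := ((PySem.List.pyRange d (a.length : Int) d).map
                     (fun i => PySem.List.pyGetD a i 0)).sum
        let sb := ((PySem.List.pyRange d (b.length : Int) d).map
                     (fun j => PySem.List.pyGetD b j 0)).sum
        PySem.List.pySetD res d (sa * sb))
      res
  (PySem.List.pyRange 1 (n : Int) 1).reverse.foldl
    (fun res g =>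
      (PySem.List.pyRange (2 * g) (n : Int) g).foldl
        (fun res m =>
          PySem.List.pySetD res g
            (PySem.List.pyGetD res g 0 - PySem.List.pyGetD res m 0))
        res)
    res

-- ===== PRECONDITION & SPEC =====
def Spec_naive_gcd_convolve (a : List Int) (b : List Int) (out : List Int) : Prop := out = naive_gcd_convolve_alt a b
instance (a : List Int) (b : List Int) (out : List Int) : Decidable (Spec_naive_gcd_convolve a b out) := by unfold Spec_naive_gcd_convolve; infer_instance

-- ===== CLAIM (what is proved, stated in full; the proofs are below) =====
def Claim_equal_naive_gcd_convolve : Prop := ∀ (a : List Int) (b : List Int), Dom_naive_gcd_convolve a b → Spec_naive_gcd_convolve a b (naive_gcd_convolve a b)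

-- ===== LEMMAS AND PROOFS =====

-- gcd-fiber sum: sum of a[i]*b[j] over i,j >= 1 with gcd i j = g
def gSum (a b : List Int) (g : Nat) : Int :=
  ∑ i ∈ Finset.Ico 1 a.length, ∑ j ∈ Finset.Ico 1 b.length,
    if Nat.gcd i j = g then a.getD i 0 * b.getD j 0 else 0

-- divisor sum: sum of xs[i] over positive multiples i of g below xs.length
def dSum (xs : List Int) (g : Nat) : Int :=
  ∑ i ∈ (Finset.Ico 1 xs.length).filter (fun i => g ∣ i), xs.getD i 0

theorem gSum_zero (a b : List Int) : gSum a b 0 = 0 := by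
  unfold gSum
  refine Finset.sum_eq_zero (fun i hi => Finset.sum_eq_zero (fun j hj => ?_))
  rw [Finset.mem_Ico] at hi hj
  rw [if_neg]
  have h : 0 < Nat.gcd i j := Nat.gcd_pos_of_pos_left j (by omega)
  omega

theorem key_identity (a b : List Int) (g : Nat) (hg : 1 ≤ g) :
    dSum a g * dSum b g
      = ∑ m ∈ (Finset.Ico 1 (min a.length b.length)).filter (fun m => g ∣ m), gSum a b m := by
  have hmid : dSum a g * dSum b g
      = ∑ i ∈ Finset.Ico 1 a.length, ∑ j ∈ Finset.Ico 1 b.length,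
          if g ∣ i ∧ g ∣ j then a.getD i 0 * b.getD j 0 else 0 := by
    unfold dSum
    rw [Finset.sum_mul_sum, Finset.sum_filter]
    refine Finset.sum_congr rfl (fun i _ => ?_)
    rw [Finset.sum_filter]
    by_cases h1 : g ∣ i
    · rw [if_pos h1]
      refine Finset.sum_congr rfl (fun j _ => ?_)
      by_cases h2 : g ∣ j <;> simp [h1, h2]
    · rw [if_neg h1, eq_comm]
      refine Finset.sum_eq_zero (fun j _ => ?_)
      simp [h1]
  rw [hmid]
  unfold gSum
  conv_rhs => rw [Finset.sum_comm]
  refine Finset.sum_congr rfl (fun i hi => ?_)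
  conv_rhs => rw [Finset.sum_comm]
  refine Finset.sum_congr rfl (fun j hj => ?_)
  conv_rhs => rw [Finset.sum_filter]
  have h1 : (∑ m ∈ Finset.Ico 1 (min a.length b.length), if g ∣ m then (if Nat.gcd i j = m then a.getD i 0 * b.getD j 0 else 0) else 0)
      = ∑ m ∈ Finset.Ico 1 (min a.length b.length), if Nat.gcd i j = m then (if g ∣ m then a.getD i 0 * b.getD j 0 else 0) else 0 := by
    refine Finset.sum_congr rfl (fun m _ => ?_)
    by_cases h : g ∣ m <;> by_cases h2 : Nat.gcd i j = m <;> simp [h, h2]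
  rw [h1, Finset.sum_ite_eq]
  rw [Finset.mem_Ico] at hi hj
  have hgpos : 0 < Nat.gcd i j := Nat.gcd_pos_of_pos_left j (by omega)
  have hle1 : Nat.gcd i j ≤ i := Nat.gcd_le_left j (by omega)
  have hle2 : Nat.gcd i j ≤ j := Nat.gcd_le_right i (by omega)
  have hmem : Nat.gcd i j ∈ Finset.Ico 1 (min a.length b.length) := by
    rw [Finset.mem_Ico]; omega
  rw [if_pos hmem]
  simp [Nat.dvd_gcd_iff]

theorem recurrence (a b : List Int) (g : Nat) (hg1 : 1 ≤ g) (hg2 : g < min a.length b.length) :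
    gSum a b g = dSum a g * dSum b g
      - ∑ m ∈ ((Finset.Ico 1 (min a.length b.length)).filter (fun m => g ∣ m)).erase g, gSum a b m := by
  have hmem : g ∈ (Finset.Ico 1 (min a.length b.length)).filter (fun m => g ∣ m) := by
    rw [Finset.mem_filter, Finset.mem_Ico]; exact ⟨⟨hg1, hg2⟩, dvd_refl g⟩
  have h := Finset.add_sum_erase _ (fun m => gSum a b m) hmem
  simp only at h
  rw [key_identity a b g hg1]
  linarith [h]
-- generic: a foldl preserves any invariant its step preserves
theorem foldl_inv {α σ : Type} (P : σ → Prop) (step : σ → α → σ)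
    (h : ∀ r x, P r → P (step r x)) :
    ∀ (l : List α) (res : σ), P res → P (l.foldl step res) := by
  intro l
  induction l with
  | nil => intro res hr; exact hr
  | cons x xs ih => intro res hr; exact ih _ (h _ _ hr)

-- Python's gcd loop on nonnegative ints is Nat.gcd
theorem pyGcdLoop_natCast : ∀ (y x : Nat), pyGcdLoop (x : Int) (y : Int) = (Nat.gcd x y : Int) := by
  intro y
  induction y using Nat.strong_induction_on with
  | _ y ih =>
    intro x
    rw [pyGcdLoop]
    by_cases hy : y = 0
    · subst hy; simp
    · rw [dif_neg (by exact_mod_cast hy)]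
      rw [PySem.Int.mod_natCast]
      rw [ih (x % y) (Nat.mod_lt x (by omega))]
      rw [Nat.gcd_comm y (x % y), ← Nat.gcd_rec y x, Nat.gcd_comm y x]

-- accumulate fold: res[p.1] += p.2 over a list of (index, value) pairs, all indices in range
theorem foldl_addAt_getD (n : Nat) (ps : List (Int × Int)) :
    ∀ res : List Int, res.length = n → (∀ p ∈ ps, 0 ≤ p.1 ∧ p.1 < (n : Int)) → ∀ g : Nat,
      ((ps.foldl (fun r p => PySem.List.pySetD r p.1 (PySem.List.pyGetD r p.1 0 + p.2)) res).getD g 0)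
        = res.getD g 0 + (ps.map (fun p => if p.1 = (g : Int) then p.2 else 0)).sum := by
  induction ps with
  | nil => intro res _ _ g; simp
  | cons p ps ih =>
    intro res hlen hb g
    have hp := hb p (List.mem_cons_self)
    obtain ⟨k, hk⟩ : ∃ k : Nat, p.1 = (k : Int) := ⟨p.1.toNat, (Int.toNat_of_nonneg hp.1).symm⟩
    have hkn : k < n := by omega
    rw [List.foldl_cons]
    rw [hk, PySem.List.pyGetD_natCast, PySem.List.pySetD_natCast]
    rw [ih _ (by simp [hlen]) (fun q hq => hb q (List.mem_cons_of_mem _ hq)) g]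
    rw [List.map_cons, List.sum_cons, hk]
    by_cases hkg : k = g
    · subst hkg
      rw [if_pos rfl]
      have : (res.set k (res.getD k 0 + p.2)).getD k 0 = res.getD k 0 + p.2 := by
        simp [List.getD, List.getElem?_set, hlen, hkn]
      rw [this]; ring
    · rw [if_neg (by exact_mod_cast hkg)]
      have : (res.set k (res.getD k 0 + p.2)).getD g 0 = res.getD g 0 := by
        simp [List.getD, List.getElem?_set, hkg]
      rw [this]; ring

-- write fold: res[d] = f d over a list of distinct nonnegative indices
theorem foldl_setf_getD (f : Int → Int) (ds : List Int) :
    ∀ res : List Int, (∀ d ∈ ds, 0 ≤ d) → ∀ g : Nat, g < res.length →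
      ((ds.foldl (fun r d => PySem.List.pySetD r d (f d)) res).getD g 0)
        = if (g : Int) ∈ ds then f (g : Int) else res.getD g 0 := by
  induction ds with
  | nil => intro res _ g _; simp
  | cons d ds ih =>
    intro res hb g hg
    have hd := hb d (List.mem_cons_self)
    obtain ⟨k, hk⟩ : ∃ k : Nat, d = (k : Int) := ⟨d.toNat, (Int.toNat_of_nonneg hd).symm⟩
    rw [List.foldl_cons, hk, PySem.List.pySetD_natCast]
    rw [ih _ (fun q hq => hb q (List.mem_cons_of_mem _ hq)) g (by simpa using hg)]
    by_cases hmem : (g : Int) ∈ ds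
    · simp [hmem]
    · rw [if_neg hmem]
      by_cases hkg : k = g
      · subst hkg
        rw [if_pos List.mem_cons_self]
        simp [List.getD, List.getElem?_set, hg]
      · rw [if_neg (by
          simp only [List.mem_cons, hmem, or_false]
          intro h
          exact hkg (by exact_mod_cast h.symm))]
        simp [List.getD, List.getElem?_set, hkg]

-- subtract fold: res[g] -= res[m] over a list of indices m, none equal to g
theorem foldl_subAt_getD (g : Nat) (ms : List Int) :
    ∀ res : List Int, g < res.length → (∀ m ∈ ms, 0 ≤ m ∧ m ≠ (g : Int)) → ∀ k : Nat,
      ((ms.foldl (fun r m => PySem.List.pySetD r (g : Int) (PySem.List.pyGetD r (g : Int) 0 - PySem.List.pyGetD r m 0)) res).getD k 0)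
        = if k = g then res.getD k 0 - (ms.map (fun m => PySem.List.pyGetD res m 0)).sum
          else res.getD k 0 := by
  induction ms with
  | nil => intro res _ _ k; by_cases hk : k = g <;> simp [hk]
  | cons m ms ih =>
    intro res hg hb k
    have hm := hb m (List.mem_cons_self)
    obtain ⟨q, hq⟩ : ∃ q : Nat, m = (q : Int) := ⟨m.toNat, (Int.toNat_of_nonneg hm.1).symm⟩
    have hqg : q ≠ g := by intro h; apply hm.2; rw [hq, h]
    rw [List.foldl_cons, hq, PySem.List.pyGetD_natCast, PySem.List.pyGetD_natCast,
        PySem.List.pySetD_natCast]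
    rw [ih _ (by simpa using hg) (fun x hx => hb x (List.mem_cons_of_mem _ hx)) k]
    have hset_g : (res.set g (res.getD g 0 - res.getD q 0)).getD g 0
        = res.getD g 0 - res.getD q 0 := by
      simp [List.getD, List.getElem?_set, hg]
    have hset_ne : ∀ r : Nat, r ≠ g → (res.set g (res.getD g 0 - res.getD q 0)).getD r 0 = res.getD r 0 := by
      intro r hr
      simp [List.getD, List.getElem?_set, Ne.symm hr]
    have hmap : (ms.map (fun m => PySem.List.pyGetD (res.set g (res.getD g 0 - res.getD q 0)) m 0))
        = ms.map (fun m => PySem.List.pyGetD res m 0) := by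
      refine List.map_congr_left (fun x hx => ?_)
      have hx' := hb x (List.mem_cons_of_mem _ hx)
      obtain ⟨r, hr⟩ : ∃ r : Nat, x = (r : Int) := ⟨x.toNat, (Int.toNat_of_nonneg hx'.1).symm⟩
      have hrg : r ≠ g := by intro h; apply hx'.2; rw [hr, h]
      rw [hr, PySem.List.pyGetD_natCast, PySem.List.pyGetD_natCast, hset_ne r hrg]
    by_cases hk : k = g
    · subst hk
      rw [if_pos rfl, if_pos rfl, hset_g, hmap, List.map_cons, List.sum_cons,
          PySem.List.pyGetD_natCast]
      ring
    · rw [if_neg hk, if_neg hk, hset_ne k hk]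
theorem sum_map_range (n : Nat) (f : Nat → Int) :
    ((List.range n).map f).sum = ∑ k ∈ Finset.range n, f k := rfl

-- range(d, L, d) lists the positive multiples of d below L
theorem pyRange_step_self (d L : Nat) (hd : 1 ≤ d) :
    PySem.List.pyRange (d : Int) (L : Int) (d : Int)
      = (List.range ((L - 1) / d)).map (fun k => ((d * (k + 1) : Nat) : Int)) := by
  rw [PySem.List.pyRange_of_pos _ _ (by exact_mod_cast hd)]
  have hcount : (if (d : Int) < (L : Int) then (((L : Int) - d + d - 1) / d).toNat else 0)
      = (L - 1) / d := by
    by_cases h : d < L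
    · rw [if_pos (by exact_mod_cast h)]
      have h1 : (L : Int) - d + d - 1 = ((L - 1 : Nat) : Int) := by push_cast; omega
      rw [h1, ← Int.natCast_div, Int.toNat_natCast]
    · rw [if_neg (by exact_mod_cast h)]
      rw [Nat.div_eq_of_lt (by omega)]
  rw [hcount]
  refine List.map_congr_left (fun k _ => ?_)
  push_cast; ring

-- range(2g, L, g) lists the multiples of g from 2g below L
theorem pyRange_step_two (g L : Nat) (hg : 1 ≤ g) :
    PySem.List.pyRange (2 * (g : Int)) (L : Int) (g : Int)
      = (List.range ((L - 1) / g - 1)).map (fun k => ((g * (k + 2) : Nat) : Int)) := by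
  rw [PySem.List.pyRange_of_pos _ _ (by exact_mod_cast hg)]
  have hcount : (if 2 * (g : Int) < (L : Int) then (((L : Int) - 2 * g + g - 1) / g).toNat else 0)
      = (L - 1) / g - 1 := by
    by_cases h : 2 * g < L
    · rw [if_pos (by exact_mod_cast h)]
      have h1 : (L : Int) - 2 * g + g - 1 = ((L - 1 - g : Nat) : Int) := by push_cast; omega
      rw [h1, ← Int.natCast_div, Int.toNat_natCast]
      have h3 : (L - 1) / g = (L - 1 - g) / g + 1 :=
        Nat.div_eq_sub_div (by omega) (by omega)
      rw [h3, Nat.add_sub_cancel]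
    · rw [if_neg (by exact_mod_cast h)]
      have h2 : (L - 1) / g < 2 := by
        rw [Nat.div_lt_iff_lt_mul (by omega : 0 < g)]; omega
      omega
  rw [hcount]
  refine List.map_congr_left (fun k _ => ?_)
  push_cast; ring

theorem sum_multiples (g L : Nat) (hg : 1 ≤ g) (f : Nat → Int) :
    ∑ k ∈ Finset.range ((L - 1) / g), f (g * (k + 1))
      = ∑ i ∈ (Finset.Ico 1 L).filter (fun i => g ∣ i), f i := by
  refine Finset.sum_nbij' (fun k => g * (k + 1)) (fun i => i / g - 1) ?_ ?_ ?_ ?_ ?_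
  · intro k hk
    rw [Finset.mem_range] at hk
    have h1 : (k + 1) * g ≤ L - 1 := by
      rw [← Nat.le_div_iff_mul_le (by omega)]; omega
    have h2 : 0 < (k + 1) * g := Nat.mul_pos (by omega) (by omega)
    have h3 : g * (k + 1) = (k + 1) * g := Nat.mul_comm _ _
    simp only [Finset.mem_filter, Finset.mem_Ico]
    refine ⟨⟨by omega, by omega⟩, dvd_mul_right g (k + 1)⟩
  · intro i hi
    simp only [Finset.mem_filter, Finset.mem_Ico] at hi
    obtain ⟨⟨h1, h2⟩, q, hq⟩ := hi
    have hq1 : 1 ≤ q := by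
      rcases Nat.eq_zero_or_pos q with h | h
      · rw [h, Nat.mul_zero] at hq; omega
      · exact h
    have hdivq : i / g = q := by rw [hq, Nat.mul_div_cancel_left _ (by omega : 0 < g)]
    have hle : i / g ≤ (L - 1) / g := Nat.div_le_div_right (by omega)
    simp only [Finset.mem_range]
    omega
  · intro k hk
    simp only
    rw [Nat.mul_div_cancel_left _ (by omega : 0 < g)]
    omega
  · intro i hi
    simp only [Finset.mem_filter, Finset.mem_Ico] at hi
    obtain ⟨⟨h1, h2⟩, q, hq⟩ := hi
    have hq1 : 1 ≤ q := by
      rcases Nat.eq_zero_or_pos q with h | h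
      · rw [h, Nat.mul_zero] at hq; omega
      · exact h
    have hdivq : i / g = q := by rw [hq, Nat.mul_div_cancel_left _ (by omega : 0 < g)]
    simp only
    rw [hdivq]
    have hq' : q - 1 + 1 = q := by omega
    rw [hq']
    omega
  · intro k _; rfl

theorem sum_multiples2 (g L : Nat) (hg : 1 ≤ g) (f : Nat → Int) :
    ∑ k ∈ Finset.range ((L - 1) / g - 1), f (g * (k + 2))
      = ∑ i ∈ ((Finset.Ico 1 L).filter (fun i => g ∣ i)).erase g, f i := by
  refine Finset.sum_nbij' (fun k => g * (k + 2)) (fun i => i / g - 2) ?_ ?_ ?_ ?_ ?_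
  · intro k hk
    rw [Finset.mem_range] at hk
    have h1 : (k + 2) * g ≤ L - 1 := by
      rw [← Nat.le_div_iff_mul_le (by omega)]; omega
    have h2 : 0 < (k + 2) * g := Nat.mul_pos (by omega) (by omega)
    have h3 : g * (k + 2) = (k + 2) * g := Nat.mul_comm _ _
    have h4 : g * 2 ≤ g * (k + 2) := Nat.mul_le_mul_left g (by omega)
    simp only [Finset.mem_erase, Finset.mem_filter, Finset.mem_Ico]
    refine ⟨by omega, ⟨by omega, by omega⟩, dvd_mul_right g (k + 2)⟩
  · intro i hi
    simp only [Finset.mem_erase, Finset.mem_filter, Finset.mem_Ico] at hi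
    obtain ⟨hne, ⟨h1, h2⟩, q, hq⟩ := hi
    have hq2 : 2 ≤ q := by
      rcases q with _ | q
      · rw [Nat.mul_zero] at hq; omega
      · rcases q with _ | q
        · rw [Nat.mul_one] at hq; omega
        · omega
    have hdivq : i / g = q := by rw [hq, Nat.mul_div_cancel_left _ (by omega : 0 < g)]
    have hle : i / g ≤ (L - 1) / g := Nat.div_le_div_right (by omega)
    simp only [Finset.mem_range]
    omega
  · intro k hk
    simp only
    rw [Nat.mul_div_cancel_left _ (by omega : 0 < g)]
    omega
  · intro i hi
    simp only [Finset.mem_erase, Finset.mem_filter, Finset.mem_Ico] at hi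
    obtain ⟨hne, ⟨h1, h2⟩, q, hq⟩ := hi
    have hq2 : 2 ≤ q := by
      rcases q with _ | q
      · rw [Nat.mul_zero] at hq; omega
      · rcases q with _ | q
        · rw [Nat.mul_one] at hq; omega
        · omega
    have hdivq : i / g = q := by rw [hq, Nat.mul_div_cancel_left _ (by omega : 0 < g)]
    simp only
    rw [hdivq]
    have hq' : q - 2 + 2 = q := by omega
    rw [hq']
    omega
  · intro k _; rfl

theorem sum_map_enumerate (φ : Int × Int → Int) :
    ∀ (xs : List Int) (s : Int),
      ((PySem.List.enumerate xs s).map φ).sum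
        = ((List.range xs.length).map (fun k : Nat => φ (s + (k : Int), xs.getD k 0))).sum := by
  intro xs
  induction xs with
  | nil => intro s; simp [PySem.List.enumerate_nil]
  | cons x xs ih =>
    intro s
    rw [PySem.List.enumerate_cons, List.map_cons, List.sum_cons, ih (s + 1)]
    rw [List.length_cons, List.range_succ_eq_map, List.map_cons, List.sum_cons, List.map_map]
    congr 1
    · simp
    · refine congrArg _ (List.map_congr_left (fun k _ => ?_))
      simp only [Function.comp_apply]
      have h1 : s + 1 + (k : Int) = s + ((k.succ : Nat) : Int) := by push_cast; ring
      rw [h1, List.getD_cons_succ]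
theorem getD_tail (xs : List Int) (k : Nat) : xs.tail.getD k 0 = xs.getD (k + 1) 0 := by
  cases xs with
  | nil => simp
  | cons x xs => simp [List.getD_cons_succ]

theorem length_foldl_addAt (ps : List (Int × Int)) (res : List Int) :
    (ps.foldl (fun r p => PySem.List.pySetD r p.1 (PySem.List.pyGetD r p.1 0 + p.2)) res).length
      = res.length := by
  refine foldl_inv (fun r => r.length = res.length) _ ?_ ps res rfl
  intro r x h
  rw [PySem.List.length_pySetD, h]

theorem sum_flatMap_int {α : Type} (l : List α) (f : α → List Int) :
    (l.flatMap f).sum = (l.map (fun x => (f x).sum)).sum := by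
  induction l with
  | nil => simp
  | cons x xs ih => simp [List.flatMap_cons, List.sum_append, ih]

theorem A_eq (a b : List Int) :
    naive_gcd_convolve a b
      = (List.range (min a.length b.length)).map (fun g => gSum a b g) := by
  unfold naive_gcd_convolve
  simp only [PySem.List.slice_from_one]
  set n := min a.length b.length with hn
  set eA := PySem.List.enumerate a.tail 1 with heA
  set eB := PySem.List.enumerate b.tail 1 with heB
  set res0 := List.replicate n (0 : Int) with hres0
  -- flatten the nested loop into one fold over (index, value) pairs
  set ps : List (Int × Int) :=
    (eA.flatMap (fun iva => eB.map (fun jvb => (iva, jvb)))).map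
      (fun p => (pyGcdLoop p.1.1 p.2.1, p.1.2 * p.2.2)) with hps
  have hflat :
      eA.foldl (fun res iva =>
          eB.foldl (fun res jvb =>
            PySem.List.pySetD res (pyGcdLoop iva.1 jvb.1)
              (PySem.List.pyGetD res (pyGcdLoop iva.1 jvb.1) 0 + iva.2 * jvb.2)) res) res0
        = ps.foldl (fun r p => PySem.List.pySetD r p.1 (PySem.List.pyGetD r p.1 0 + p.2)) res0 := by
    rw [hps, List.foldl_map, List.foldl_flatMap]
    simp only [List.foldl_map]
  rw [hflat]
  -- membership facts about eA / eB
  have hmemA : ∀ p ∈ eA, ∃ k : Nat, k < a.tail.length ∧ p = (1 + (k : Int), a.tail.getD k 0) := by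
    intro p hp
    rw [heA, PySem.List.mem_enumerate_iff] at hp
    obtain ⟨k, hk, hpk⟩ := hp
    exact ⟨k, hk, by rw [hpk]; congr 1; exact (List.getD_eq_getElem _ _ hk).symm⟩
  have hmemB : ∀ p ∈ eB, ∃ k : Nat, k < b.tail.length ∧ p = (1 + (k : Int), b.tail.getD k 0) := by
    intro p hp
    rw [heB, PySem.List.mem_enumerate_iff] at hp
    obtain ⟨k, hk, hpk⟩ := hp
    exact ⟨k, hk, by rw [hpk]; congr 1; exact (List.getD_eq_getElem _ _ hk).symm⟩
  have hbound : ∀ p ∈ ps, 0 ≤ p.1 ∧ p.1 < (n : Int) := by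
    intro p hp
    rw [hps, List.mem_map] at hp
    obtain ⟨q, hq, hpq⟩ := hp
    rw [List.mem_flatMap] at hq
    obtain ⟨iva, hiva, hq2⟩ := hq
    rw [List.mem_map] at hq2
    obtain ⟨jvb, hjvb, hq3⟩ := hq2
    obtain ⟨k, hk, hiva'⟩ := hmemA iva hiva
    obtain ⟨l, hl, hjvb'⟩ := hmemB jvb hjvb
    subst hq3 hpq hiva' hjvb'
    simp only
    have hc1 : (1 : Int) + (k : Int) = ((1 + k : Nat) : Int) := by push_cast; ring
    have hc2 : (1 : Int) + (l : Int) = ((1 + l : Nat) : Int) := by push_cast; ring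
    rw [hc1, hc2, pyGcdLoop_natCast]
    have h1 : 0 < Nat.gcd (1 + k) (1 + l) := Nat.gcd_pos_of_pos_left _ (by omega)
    have h2 : Nat.gcd (1 + k) (1 + l) ≤ 1 + k := Nat.gcd_le_left _ (by omega)
    have h3 : Nat.gcd (1 + k) (1 + l) ≤ 1 + l := Nat.gcd_le_right _ (by omega)
    have hka : k < a.length - 1 := by simpa using hk
    have hlb : l < b.length - 1 := by simpa using hl
    constructor
    · exact_mod_cast Int.ofNat_nonneg _
    · have : Nat.gcd (1 + k) (1 + l) < n := by rw [hn]; omega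
      exact_mod_cast this
  -- pointwise value
  have hlen : (ps.foldl (fun r p => PySem.List.pySetD r p.1 (PySem.List.pyGetD r p.1 0 + p.2)) res0).length = n := by
    rw [length_foldl_addAt, hres0, List.length_replicate]
  refine List.ext_getElem (by rw [hlen]; simp) ?_
  intro g hg1 hg2
  have hgn : g < n := by rw [hlen] at hg1; exact hg1
  have hval := foldl_addAt_getD n ps res0 (by rw [hres0, List.length_replicate]) hbound g
  rw [← List.getD_eq_getElem _ 0 hg1, hval]
  have hres0g : res0.getD g 0 = 0 := by rw [hres0]; simp [List.getD_replicate]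
  rw [hres0g, zero_add]
  -- compute the sum
  rw [hps, List.map_map, List.map_flatMap]
  simp only [List.map_map, sum_flatMap_int, Function.comp_def]
  rw [heA, sum_map_enumerate _ a.tail 1]
  have hsum2 : ∀ k : Nat,
      ((eB.map (fun jvb => if pyGcdLoop (1 + (k : Int)) jvb.1 = (g : Int) then a.tail.getD k 0 * jvb.2 else 0)).sum)
        = ((List.range (b.length - 1)).map (fun l : Nat =>
            if Nat.gcd (1 + k) (1 + l) = g then a.getD (1 + k) 0 * b.getD (1 + l) 0 else 0)).sum := by
    intro k
    rw [heB, sum_map_enumerate _ b.tail 1, List.length_tail]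
    refine congrArg _ (List.map_congr_left (fun l _ => ?_))
    simp only
    have hc1 : (1 : Int) + (k : Int) = ((1 + k : Nat) : Int) := by push_cast; ring
    have hc2 : (1 : Int) + (l : Int) = ((1 + l : Nat) : Int) := by push_cast; ring
    rw [hc1, hc2, pyGcdLoop_natCast, getD_tail, getD_tail]
    have e1 : k + 1 = 1 + k := by omega
    have e2 : l + 1 = 1 + l := by omega
    rw [e1, e2]
    by_cases h : Nat.gcd (1 + k) (1 + l) = g
    · rw [if_pos (by exact_mod_cast h), if_pos h]
    · rw [if_neg (by intro hh; exact h (by exact_mod_cast hh)), if_neg h]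
  -- assemble into gSum
  rw [List.getElem_map, List.getElem_range]
  unfold gSum
  rw [Finset.sum_Ico_eq_sum_range, ← sum_map_range, List.length_tail]
  refine congrArg _ (List.map_congr_left (fun k _ => ?_))
  dsimp only
  rw [hsum2 k, sum_map_range, Finset.sum_Ico_eq_sum_range]
theorem dsum_from_pyRange (xs : List Int) (g : Nat) (hg : 1 ≤ g) :
    ((PySem.List.pyRange (g : Int) (xs.length : Int) (g : Int)).map
        (fun i => PySem.List.pyGetD xs i 0)).sum = dSum xs g := by
  rw [pyRange_step_self g xs.length hg, List.map_map]
  simp only [Function.comp_def, PySem.List.pyGetD_natCast]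
  rw [sum_map_range]
  unfold dSum
  exact sum_multiples g xs.length hg (fun i => xs.getD i 0)

theorem phase1_getD (a b : List Int) (g : Nat) (hg : g < min a.length b.length) :
    ((PySem.List.pyRange 1 ((min a.length b.length : Nat) : Int) 1).foldl
        (fun res d => PySem.List.pySetD res d
          (((PySem.List.pyRange d (a.length : Int) d).map (fun i => PySem.List.pyGetD a i 0)).sum *
           ((PySem.List.pyRange d (b.length : Int) d).map (fun j => PySem.List.pyGetD b j 0)).sum))
        (List.replicate (min a.length b.length) (0 : Int))).getD g 0
      = if 1 ≤ g then dSum a g * dSum b g else 0 := by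
  rw [foldl_setf_getD _ _ _
      (fun d hd => by
        rw [PySem.List.mem_pyRange_one] at hd
        omega)
      g (by rw [List.length_replicate]; exact hg)]
  by_cases h1 : 1 ≤ g
  · rw [if_pos (by rw [PySem.List.mem_pyRange_one]; constructor <;> [exact_mod_cast h1; exact_mod_cast hg]),
        if_pos h1]
    rw [dsum_from_pyRange a g h1, dsum_from_pyRange b g h1]
  · rw [if_neg (by rw [PySem.List.mem_pyRange_one]; intro hc; exact h1 (by exact_mod_cast hc.1)), if_neg h1]
    simp [List.getD_replicate]

theorem outer_loop (a b : List Int) :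
    ∀ (t : Nat), t ≤ min a.length b.length →
    ∀ r : List Int, r.length = min a.length b.length →
    (∀ m : Nat, m < min a.length b.length →
        r.getD m 0 = if 1 ≤ m ∧ m < t then dSum a m * dSum b m else gSum a b m) →
    ((PySem.List.pyRange 1 (t : Int) 1).reverse.foldl
        (fun res g =>
          (PySem.List.pyRange (2 * g) ((min a.length b.length : Nat) : Int) g).foldl
            (fun res m => PySem.List.pySetD res g
              (PySem.List.pyGetD res g 0 - PySem.List.pyGetD res m 0)) res)
        r).length = min a.length b.length
    ∧ ∀ k : Nat, k < min a.length b.length →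
        ((PySem.List.pyRange 1 (t : Int) 1).reverse.foldl
          (fun res g =>
            (PySem.List.pyRange (2 * g) ((min a.length b.length : Nat) : Int) g).foldl
              (fun res m => PySem.List.pySetD res g
                (PySem.List.pyGetD res g 0 - PySem.List.pyGetD res m 0)) res)
          r).getD k 0 = gSum a b k := by
  intro t
  induction t with
  | zero =>
    intro _ r hr hinv
    rw [PySem.List.pyRange_one_eq_nil (by norm_num), List.reverse_nil, List.foldl_nil]
    refine ⟨hr, fun k hk => ?_⟩
    rw [hinv k hk, if_neg (by omega)]
  | succ t ih =>
    intro ht r hr hinv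
    by_cases ht0 : t = 0
    · subst ht0
      rw [(by norm_num : ((0 + 1 : Nat) : Int) = 1), PySem.List.pyRange_one_eq_nil (by norm_num),
          List.reverse_nil, List.foldl_nil]
      refine ⟨hr, fun k hk => ?_⟩
      rw [hinv k hk, if_neg (by omega)]
    · have ht1 : 1 ≤ t := by omega
      have hcast : ((t + 1 : Nat) : Int) = (t : Int) + 1 := by push_cast; ring
      rw [hcast, PySem.List.pyRange_one_succ_right (by exact_mod_cast ht1), List.reverse_append,
          List.reverse_cons, List.reverse_nil, List.nil_append, List.singleton_append,
          List.foldl_cons]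
      -- the inner loop processing index t
      have htn : t < min a.length b.length := by omega
      have hms : ∀ m ∈ PySem.List.pyRange (2 * (t : Int)) ((min a.length b.length : Nat) : Int) (t : Int),
          0 ≤ m ∧ m ≠ (t : Int) := by
        intro m hm
        rw [pyRange_step_two t (min a.length b.length) ht1, List.mem_map] at hm
        obtain ⟨k, hk, hmk⟩ := hm
        subst hmk
        have h2 : t * 2 ≤ t * (k + 2) := Nat.mul_le_mul_left t (by omega)
        constructor
        · exact_mod_cast Int.ofNat_nonneg _
        · intro hc
          have : t * (k + 2) = t := by exact_mod_cast hc
          omega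
      have hsub := foldl_subAt_getD t
        (PySem.List.pyRange (2 * (t : Int)) ((min a.length b.length : Nat) : Int) (t : Int))
        r (by omega) hms
      -- the subtracted sum is the sum of gSum over proper multiples of t
      have hmapsum :
          ((PySem.List.pyRange (2 * (t : Int)) ((min a.length b.length : Nat) : Int) (t : Int)).map
              (fun m => PySem.List.pyGetD r m 0)).sum
            = ∑ i ∈ ((Finset.Ico 1 (min a.length b.length)).filter (fun i => t ∣ i)).erase t,
                gSum a b i := by
        rw [pyRange_step_two t (min a.length b.length) ht1, List.map_map]
        rw [← sum_multiples2 t (min a.length b.length) ht1 (fun i => gSum a b i), ← sum_map_range]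
        refine congrArg _ (List.map_congr_left (fun k hk => ?_))
        rw [List.mem_range] at hk
        simp only [Function.comp_def, PySem.List.pyGetD_natCast]
        have h1 : (k + 2) * t ≤ min a.length b.length - 1 := by
          rw [← Nat.le_div_iff_mul_le (by omega)]; omega
        have h2 : t * (k + 2) = (k + 2) * t := Nat.mul_comm _ _
        have h3 : t * 2 ≤ t * (k + 2) := Nat.mul_le_mul_left t (by omega)
        rw [hinv (t * (k + 2)) (by omega), if_neg (by omega)]
      -- the state after processing t satisfies the invariant for t
      have hlen'' : ∀ res : List Int,
          ((PySem.List.pyRange (2 * (t : Int)) ((min a.length b.length : Nat) : Int) (t : Int)).foldl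
            (fun res m => PySem.List.pySetD res (t : Int)
              (PySem.List.pyGetD res (t : Int) 0 - PySem.List.pyGetD res m 0)) res).length = res.length := by
        intro res
        refine foldl_inv (fun x => x.length = res.length) _ ?_ _ res rfl
        intro x y h
        dsimp only at h ⊢
        rw [PySem.List.length_pySetD, h]
      refine ih (by omega) _ (by rw [hlen'', hr]) ?_
      intro m hm
      rw [hsub m]
      by_cases hmt : m = t
      · subst hmt
        rw [if_pos rfl, hmapsum, hinv m hm, if_pos (by omega)]
        rw [← recurrence a b m ht1 htn, if_neg (by omega)]
      · rw [if_neg hmt, hinv m hm]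
        by_cases h1 : 1 ≤ m ∧ m < t
        · rw [if_pos h1, if_pos (by omega)]
        · rw [if_neg h1, if_neg (by omega)]

theorem B_eq (a b : List Int) :
    naive_gcd_convolve_alt a b
      = (List.range (min a.length b.length)).map (fun g => gSum a b g) := by
  unfold naive_gcd_convolve_alt
  have hlen1 :
      ((PySem.List.pyRange 1 ((min a.length b.length : Nat) : Int) 1).foldl
        (fun res d => PySem.List.pySetD res d
          (((PySem.List.pyRange d (a.length : Int) d).map (fun i => PySem.List.pyGetD a i 0)).sum *
           ((PySem.List.pyRange d (b.length : Int) d).map (fun j => PySem.List.pyGetD b j 0)).sum))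
        (List.replicate (min a.length b.length) (0 : Int))).length = min a.length b.length := by
    have := foldl_inv (fun x : List Int => x.length = min a.length b.length)
      (fun res d => PySem.List.pySetD res d
          (((PySem.List.pyRange d (a.length : Int) d).map (fun i => PySem.List.pyGetD a i 0)).sum *
           ((PySem.List.pyRange d (b.length : Int) d).map (fun j => PySem.List.pyGetD b j 0)).sum))
      (fun r x h => by dsimp only at h ⊢; rw [PySem.List.length_pySetD, h])
      (PySem.List.pyRange 1 ((min a.length b.length : Nat) : Int) 1)
      (List.replicate (min a.length b.length) (0 : Int))
      (by dsimp only; rw [List.length_replicate])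
    exact this
  have hout := outer_loop a b (min a.length b.length) le_rfl _ hlen1 (fun m hm => by
    rw [phase1_getD a b m hm]
    by_cases h1 : 1 ≤ m
    · rw [if_pos h1, if_pos ⟨h1, hm⟩]
    · rw [if_neg h1, if_neg (by omega)]
      have hm0 : m = 0 := by omega
      rw [hm0, gSum_zero])
  refine List.ext_getElem (by rw [hout.1]; simp) ?_
  intro g hg1 hg2
  have hgn : g < min a.length b.length := by rw [hout.1] at hg1; exact hg1
  rw [← List.getD_eq_getElem _ 0 hg1, hout.2 g hgn, List.getElem_map, List.getElem_range]

-- ===== VERDICT (by name: the statement is the Claim_ definition above) =====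
theorem naive_gcd_convolve_spec : Claim_equal_naive_gcd_convolve := by
  intro a b _
  unfold Spec_naive_gcd_convolve
  rw [A_eq, B_eq]
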